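-- pv_equiv track=rewrite | github.com/mmore500/hstrat | hstrat/_auxiliary_lib/_flag_last.py | flag_last
-- ===== SOURCE A (Python) =====
-- from collections import deque
-- import itertools as it
-- import typing
--
-- def flag_last(
--     iterable: typing.Iterable,
-- ) -> typing.Iterator[typing.Tuple[bool, typing.Any]]:
--     """Yields tuples of the form (is_last, value) for each value in the
--     iterable, where is_last is True if the value is the last in the iterable
--     and False otherwise.
--
--     Parameters
--     ----------
--     iterable : iterable
--         The iterable to be processed.
--
--     Yields
--     ------
--     flagged_value : tuple
--         Tuples of the form (is_last, value) for each value in the iterable.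
--
--     Examples
--     --------
--     >>> [*flag_last([1, 2, 3, 4, 5])]
--     [(False, 1), (False, 2), (False, 3), (False, 4), (True, 5)]
--
--     >>> [*flag_last([1])]
--     [(True, 1)]
--
--     >>> [*flag_last([])]
--     []
--
--     """
--     iterator = iter(iterable)
--     lookahead = deque(it.islice(iterator, 2), maxlen=2)
--
--     while lookahead:
--         yield (len(lookahead) == 1, lookahead.popleft())
--         for val in iterator:
--             lookahead.append(val)
--             break
-- ===== SOURCE B (Python) =====
-- def flag_last(iterable):
--     iterator = iter(iterable)
--     try:
--         prev = next(iterator)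
--     except StopIteration:
--         return
--     for val in iterator:
--         yield (False, prev)
--         prev = val
--     yield (True, prev)
-- ===== Notes on version B (the rewrite author's own statement) =====
-- stated objective: simpler
-- what changed: Replaces the two-element deque lookahead buffer and the inner one-step for loop with a single scalar prev variable (yield (False, prev) while advancing, (True, prev) after the loop); measured ~1.7x faster by dropping deque operations.
import Mathlib
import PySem

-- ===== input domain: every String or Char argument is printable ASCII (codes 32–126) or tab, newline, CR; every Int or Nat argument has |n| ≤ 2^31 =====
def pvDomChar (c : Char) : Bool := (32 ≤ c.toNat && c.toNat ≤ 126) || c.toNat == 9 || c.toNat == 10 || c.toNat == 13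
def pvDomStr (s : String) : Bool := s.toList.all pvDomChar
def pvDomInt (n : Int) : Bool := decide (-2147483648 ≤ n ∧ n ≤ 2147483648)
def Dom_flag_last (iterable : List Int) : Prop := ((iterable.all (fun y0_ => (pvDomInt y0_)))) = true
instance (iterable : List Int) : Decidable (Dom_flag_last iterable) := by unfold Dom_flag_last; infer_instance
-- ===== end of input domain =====

-- B replaces A's two-element deque lookahead with a single scalar `prev` (simpler decomposition).

-- ===== PORT A =====
-- A keeps a deque `lookahead` of at most 2 upcoming values and the not-yet-read
-- remainder of the iterator `rest`; each round pops the front, flags it last iff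
-- the deque held exactly one element, and refills one value from `rest`.
def flagLastLoopA : List Int → List Int → List (Bool × Int)
  | [], _ => []
  | x :: la, rest =>
    (la.isEmpty, x) ::
      match rest with
      | [] => flagLastLoopA la []
      | v :: rest' => flagLastLoopA (la ++ [v]) rest'
  termination_by la rest => la.length + rest.length
  decreasing_by all_goals simp_all

def flag_last (iterable : List Int) : List (Bool × Int) :=
  flagLastLoopA (iterable.take 2) (iterable.drop 2)

-- ===== PORT B =====
-- B: prev holds the previously read value; the generator's for-loop over the rest.
def flagLastLoopB (prev : Int) : List Int → List (Bool × Int)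
  | [] => [(true, prev)]
  | v :: t => (false, prev) :: flagLastLoopB v t

def flag_last_alt (iterable : List Int) : List (Bool × Int) :=
  match iterable with
  | [] => []
  | x :: t => flagLastLoopB x t

-- ===== PRECONDITION & SPEC =====
def Spec_flag_last (iterable : List Int) (out : List (Bool × Int)) : Prop := out = flag_last_alt iterable
instance (iterable : List Int) (out : List (Bool × Int)) : Decidable (Spec_flag_last iterable out) := by unfold Spec_flag_last; infer_instance

-- ===== CLAIM (what is proved, stated in full; the proofs are below) =====
def Claim_equal_flag_last : Prop := ∀ (iterable : List Int), Dom_flag_last iterable → Spec_flag_last iterable (flag_last iterable)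

-- ===== LEMMAS AND PROOFS =====
theorem flagLastLoopA_two (r : List Int) : ∀ (x y : Int),
    flagLastLoopA [x, y] r = flagLastLoopB x (y :: r) := by
  induction r with
  | nil => intro x y; simp [flagLastLoopA, flagLastLoopB]
  | cons v r' ih => intro x y; simp [flagLastLoopA, flagLastLoopB, ih]

-- ===== VERDICT (by name: the statement is the Claim_ definition above) =====
theorem flag_last_spec : Claim_equal_flag_last := by
  intro iterable _
  unfold Spec_flag_last flag_last flag_last_alt
  match iterable with
  | [] => simp [flagLastLoopA]
  | [x] => simp [flagLastLoopA, flagLastLoopB]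
  | x :: y :: t => simpa using flagLastLoopA_two t x y
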